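-- pv_equiv track=rewrite | github.com/proximious/rit_coursework | year1/CS141/week07/lab07/lasers.py | splicing
-- ===== SOURCE A (Python) =====
-- def splicing(lst, num):
--     """
--     splices the function of any repeating indexes
--     :param lst: sorted list without being spliced
--     :param num: the
--     :return:
--     """
--     spliced_lst = []
--     idx_lst = []
--     k = 1
--     for i in range(len(lst)):
--         if lst[i][1] == 1 or lst[i][1] == (len(num) - 2):
--             spliced_lst.append(lst[i])
--             idx_lst.append(i)
--
--         for j in range(k, len(lst)):
--             if i == j:
--                 pass
--             elif i in idx_lst:
--                 break
--             elif lst[i][1] == lst[j][1]: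
--                 spliced_lst.append(lst[i])
--                 idx_lst.append(i)
--                 k += 1
--             else:
--                 pass
--
--     return spliced_lst
-- ===== SOURCE B (Python) =====
-- def splicing(lst, num):
--     """
--     Keeps boundary rows (second value 1 or len(num)-2) unconditionally; any
--     other row is kept when its second value also occurs at some position at or
--     beyond a cursor k (other than the row's own position); the cursor advances
--     one slot per such match.  Occurrences are looked up in a precomputed
--     value -> positions index instead of rescanning the whole list.
--     """
--     positions = {}
--     for j, row in enumerate(lst):
--         positions.setdefault(row[1], []).append(j)
--     hi = len(num) - 2
--     out = []
--     k = 1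
--     for i, row in enumerate(lst):
--         v = row[1]
--         if v == 1 or v == hi:
--             out.append(row)
--         elif any(j >= k and j != i for j in positions[v]):
--             out.append(row)
--             k += 1
--     return out
-- ===== Notes on version B (the rewrite author's own statement) =====
-- stated objective: alternative
-- what changed: Replaces A's nested scan over range(k, len(lst)) with idx_lst/break bookkeeping by a precomputed value-to-positions index: each row is decided by one any() pass over the (usually short) position list of its own value; Pre_ excludes rows with fewer than 2 entries, on which A raises IndexError.
import Mathlib
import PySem

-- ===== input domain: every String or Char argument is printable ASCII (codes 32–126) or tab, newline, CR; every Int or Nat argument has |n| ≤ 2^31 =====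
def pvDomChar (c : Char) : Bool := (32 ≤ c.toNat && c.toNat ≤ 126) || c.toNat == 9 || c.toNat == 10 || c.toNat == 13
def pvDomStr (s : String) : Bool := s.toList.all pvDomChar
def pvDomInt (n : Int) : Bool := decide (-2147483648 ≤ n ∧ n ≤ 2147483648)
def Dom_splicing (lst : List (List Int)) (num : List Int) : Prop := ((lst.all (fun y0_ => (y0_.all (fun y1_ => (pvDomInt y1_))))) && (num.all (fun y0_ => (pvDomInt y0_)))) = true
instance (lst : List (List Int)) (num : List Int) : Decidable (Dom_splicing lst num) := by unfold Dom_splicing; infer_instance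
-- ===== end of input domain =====

-- B looks each row's second value up in a precomputed value → positions index instead of A's nested rescan of the list (objective: alternative).

-- ===== PORT A =====
-- lst[i][1] (exact under Pre_splicing: every row has length ≥ 2, and all indices used are in range)
def pvVal (lst : List (List Int)) (i : Int) : Int :=
  PySem.List.pyGetD (PySem.List.pyGetD lst i []) 1 0

-- lst[i] (exact: i is always in range)
def pvRow (lst : List (List Int)) (i : Int) : List Int :=
  PySem.List.pyGetD lst i []

-- the inner 'for j in range(k, len(lst))' loop; state = (spliced_lst, idx_lst, k); 'break' = return the state
def spliceInner (lst : List (List Int)) (i : Int) (js : List Int)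
    (st : List (List Int) × List Int × Int) : List (List Int) × List Int × Int :=
  match js with
  | [] => st
  | j :: rest =>
    if i = j then spliceInner lst i rest st
    else if i ∈ st.2.1 then st
    else if pvVal lst i = pvVal lst j then
      spliceInner lst i rest (st.1 ++ [pvRow lst i], st.2.1 ++ [i], st.2.2 + 1)
    else spliceInner lst i rest st

-- the outer 'for i in range(len(lst))' loop
def spliceOuter (lst : List (List Int)) (hi : Int) (is_ : List Int)
    (st : List (List Int) × List Int × Int) : List (List Int) × List Int × Int :=
  match is_ with
  | [] => st
  | i :: rest =>
    let st1 := if pvVal lst i = 1 ∨ pvVal lst i = hi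
      then (st.1 ++ [pvRow lst i], st.2.1 ++ [i], st.2.2) else st
    spliceOuter lst hi rest
      (spliceInner lst i (PySem.List.pyRange st1.2.2 (lst.length : Int) 1) st1)

def splicing (lst : List (List Int)) (num : List Int) : List (List Int) :=
  (spliceOuter lst ((num.length : Int) - 2)
    (PySem.List.pyRange 0 (lst.length : Int) 1) ([], [], 1)).1

-- ===== PORT B =====
-- body of B's first loop: positions.setdefault(row[1], []).append(j)
def posStep (d : PySem.Dict Int (List Int)) (p : Int × List Int) : PySem.Dict Int (List Int) :=
  d.modify (PySem.List.pyGetD p.2 1 0) [] (· ++ [p.1])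

-- body of B's second loop; state = (out, k); positions[v] always has v as a key
-- (every row was inserted in the first loop), so the getD default is never read
def altStep (pos : PySem.Dict Int (List Int)) (hi : Int)
    (st : List (List Int) × Int) (p : Int × List Int) : List (List Int) × Int :=
  let v := PySem.List.pyGetD p.2 1 0
  if v = 1 ∨ v = hi then (st.1 ++ [p.2], st.2)
  else if (pos.getD v []).any (fun j => decide (st.2 ≤ j) && j != p.1) then
    (st.1 ++ [p.2], st.2 + 1)
  else st

def splicing_alt (lst : List (List Int)) (num : List Int) : List (List Int) :=
  let pos := (PySem.List.enumerate lst 0).foldl posStep PySem.Dict.empty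
  ((PySem.List.enumerate lst 0).foldl
    (altStep pos ((num.length : Int) - 2)) ([], 1)).1

-- ===== PRECONDITION & SPEC =====
-- A evaluates lst[i][1] for every i; it raises IndexError exactly when some row has fewer than 2 entries.
def Pre_splicing (lst : List (List Int)) (num : List Int) : Prop := ∀ r ∈ lst, 2 ≤ r.length
instance (lst : List (List Int)) (num : List Int) : Decidable (Pre_splicing lst num) := by
  unfold Pre_splicing; infer_instance

def pvWitness_splicing : List (List Int) × List Int := ([[0, 1], [5, 3], [6, 3]], [0, 0, 0])

def Spec_splicing (lst : List (List Int)) (num : List Int) (out : List (List Int)) : Prop := out = splicing_alt lst num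
instance (lst : List (List Int)) (num : List Int) (out : List (List Int)) : Decidable (Spec_splicing lst num out) := by unfold Spec_splicing; infer_instance

-- ===== CLAIM (what is proved, stated in full; the proofs are below) =====
def Claim_equal_splicing : Prop := ∀ (lst : List (List Int)) (num : List Int), Dom_splicing lst num → Pre_splicing lst num → Spec_splicing lst num (splicing lst num)

-- ===== LEMMAS AND PROOFS =====

-- the common abstract step on (out, k) for index i
def stepF (lst : List (List Int)) (hi : Int) (st : List (List Int) × Int) (i : Int) :
    List (List Int) × Int :=
  if pvVal lst i = 1 ∨ pvVal lst i = hi then (st.1 ++ [pvRow lst i], st.2)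
  else if ∃ j ∈ PySem.List.pyRange st.2 (lst.length : Int) 1, j ≠ i ∧ pvVal lst j = pvVal lst i
    then (st.1 ++ [pvRow lst i], st.2 + 1)
  else st

-- j (an Int index) is an occurrence of second-value v
def occAt (lst : List (List Int)) (j v : Int) : Prop :=
  0 ≤ j ∧ j < (lst.length : Int) ∧ pvVal lst j = v

-- A's inner loop does nothing once i ∈ idx_lst
theorem spliceInner_mem (lst : List (List Int)) (i : Int) (js : List Int)
    (st : List (List Int) × List Int × Int) (h : i ∈ st.2.1) :
    spliceInner lst i js st = st := by
  induction js with
  | nil => rfl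
  | cons j rest ih =>
    unfold spliceInner
    by_cases hij : i = j
    · rw [if_pos hij]; exact ih
    · rw [if_neg hij, if_pos (by simpa using h)]

-- A's inner loop, when i ∉ idx_lst, appends lst[i] iff some j ∈ js matches
theorem spliceInner_not_mem (lst : List (List Int)) (i : Int) (js : List Int)
    (st : List (List Int) × List Int × Int) (h : i ∉ st.2.1) :
    spliceInner lst i js st =
      if ∃ j ∈ js, j ≠ i ∧ pvVal lst j = pvVal lst i
      then (st.1 ++ [pvRow lst i], st.2.1 ++ [i], st.2.2 + 1) else st := by
  induction js with
  | nil => simp [spliceInner]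
  | cons j rest ih =>
    unfold spliceInner
    by_cases hij : i = j
    · rw [if_pos hij, ih]
      have hh : ¬(j ≠ i ∧ pvVal lst j = pvVal lst i) := fun ⟨h1, _⟩ => h1 hij.symm
      simp [hh]
    · by_cases hv : pvVal lst i = pvVal lst j
      · have : i ∈ (st.1 ++ [pvRow lst i], st.2.1 ++ [i], st.2.2 + 1).2.1 := by simp
        rw [if_neg hij, if_neg (by simpa using h), if_pos hv,
            spliceInner_mem lst i rest _ this]
        rw [if_pos ⟨j, List.mem_cons_self .., Ne.symm hij, hv.symm⟩]
      · rw [if_neg hij, if_neg (by simpa using h), if_neg hv, ih]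
        have : ¬ (j ≠ i ∧ pvVal lst j = pvVal lst i) := by
          intro ⟨_, h2⟩; exact hv h2.symm
        simp [this]

-- A's outer loop tracks the abstract fold; idx_lst only holds already-processed indices
theorem spliceOuter_eq (lst : List (List Int)) (hi : Int) (is_ : List Int)
    (st : List (List Int) × List Int × Int)
    (hp : is_.Pairwise (· < ·)) (hb : ∀ x ∈ st.2.1, ∀ i ∈ is_, x < i) :
    ∃ idx', spliceOuter lst hi is_ st =
      ((is_.foldl (stepF lst hi) (st.1, st.2.2)).1, idx',
       (is_.foldl (stepF lst hi) (st.1, st.2.2)).2) := by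
  induction is_ generalizing st with
  | nil => exact ⟨st.2.1, rfl⟩
  | cons i rest ih =>
    have hlt : ∀ i' ∈ rest, i < i' := (List.pairwise_cons.mp hp).1
    have hp' : rest.Pairwise (· < ·) := (List.pairwise_cons.mp hp).2
    by_cases hbd : pvVal lst i = 1 ∨ pvVal lst i = hi
    · have h1 : spliceOuter lst hi (i :: rest) st
          = spliceOuter lst hi rest (st.1 ++ [pvRow lst i], st.2.1 ++ [i], st.2.2) := by
        simp only [spliceOuter]
        rw [if_pos hbd, spliceInner_mem _ _ _ _ (by simp)]
      obtain ⟨idx', h2⟩ := ih (st.1 ++ [pvRow lst i], st.2.1 ++ [i], st.2.2) hp'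
        (by intro x hx i' hi'
            rcases List.mem_append.mp hx with hx | hx
            · exact hb x hx i' (List.mem_cons_of_mem _ hi')
            · simp at hx; subst hx; exact hlt i' hi')
      refine ⟨idx', ?_⟩
      rw [h1, h2, List.foldl_cons]
      have hst : stepF lst hi (st.1, st.2.2) i = (st.1 ++ [pvRow lst i], st.2.2) := by
        simp [stepF, hbd]
      rw [hst]
    · have hni : i ∉ st.2.1 := fun hx => lt_irrefl i (hb i hx i (List.mem_cons_self ..))
      have h1 : spliceOuter lst hi (i :: rest) st
          = spliceOuter lst hi rest
              (if ∃ j ∈ PySem.List.pyRange st.2.2 (lst.length : Int) 1,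
                  j ≠ i ∧ pvVal lst j = pvVal lst i
               then (st.1 ++ [pvRow lst i], st.2.1 ++ [i], st.2.2 + 1) else st) := by
        simp only [spliceOuter]
        rw [if_neg hbd, spliceInner_not_mem _ _ _ _ hni]
      by_cases hex : ∃ j ∈ PySem.List.pyRange st.2.2 (lst.length : Int) 1,
          j ≠ i ∧ pvVal lst j = pvVal lst i
      · obtain ⟨idx', h2⟩ := ih (st.1 ++ [pvRow lst i], st.2.1 ++ [i], st.2.2 + 1) hp'
          (by intro x hx i' hi'
              rcases List.mem_append.mp hx with hx | hx
              · exact hb x hx i' (List.mem_cons_of_mem _ hi')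
              · simp at hx; subst hx; exact hlt i' hi')
        refine ⟨idx', ?_⟩
        rw [h1, if_pos hex, h2, List.foldl_cons]
        have hst : stepF lst hi (st.1, st.2.2) i = (st.1 ++ [pvRow lst i], st.2.2 + 1) := by
          simp only [stepF, if_neg hbd]
          rw [if_pos hex]
        rw [hst]
      · obtain ⟨idx', h2⟩ := ih st hp'
          (fun x hx i' hi' => hb x hx i' (List.mem_cons_of_mem _ hi'))
        refine ⟨idx', ?_⟩
        rw [h1, if_neg hex, h2, List.foldl_cons]
        have hst : stepF lst hi (st.1, st.2.2) i = (st.1, st.2.2) := by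
          simp only [stepF, if_neg hbd]
          rw [if_neg hex]
        rw [hst]

theorem splicing_eq_fold (lst : List (List Int)) (num : List Int) :
    splicing lst num =
      ((PySem.List.pyRange 0 (lst.length : Int) 1).foldl
        (stepF lst ((num.length : Int) - 2)) ([], 1)).1 := by
  obtain ⟨idx', h⟩ := spliceOuter_eq lst ((num.length : Int) - 2)
    (PySem.List.pyRange 0 (lst.length : Int) 1) ([], [], 1)
    (PySem.List.pairwise_lt_pyRange_one 0 (lst.length : Int)) (by simp)
  simp [splicing, h]

-- every pair (i, row) produced by enumerate is a genuine row of lst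
theorem enum_facts (lst : List (List Int)) (p : Int × List Int)
    (hp : p ∈ PySem.List.enumerate lst 0) :
    occAt lst p.1 (PySem.List.pyGetD p.2 1 0) ∧
      pvRow lst p.1 = p.2 ∧ pvVal lst p.1 = PySem.List.pyGetD p.2 1 0 := by
  obtain ⟨k, hk, hpk⟩ := (PySem.List.mem_enumerate_iff lst 0 p).mp hp
  subst hpk
  have hrow : PySem.List.pyGetD lst ((0 : Int) + (k : Int)) [] = lst[k] := by
    rw [show ((0 : Int) + (k : Int)) = ((k : Int)) by ring, PySem.List.pyGetD_natCast]
    exact List.getD_eq_getElem _ _ hk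
  refine ⟨⟨by positivity, by simp; omega, ?_⟩, ?_, ?_⟩
  · show PySem.List.pyGetD (PySem.List.pyGetD lst _ []) 1 0 = _
    rw [hrow]
  · exact hrow
  · show PySem.List.pyGetD (PySem.List.pyGetD lst _ []) 1 0 = _
    rw [hrow]

-- B's index: positions[v] holds exactly the occurrence indices of v
theorem mem_pos (lst : List (List Int)) (v j : Int) :
    j ∈ ((PySem.List.enumerate lst 0).foldl posStep PySem.Dict.empty).getD v []
      ↔ occAt lst j v := by
  have hshape : (PySem.List.enumerate lst 0).foldl posStep PySem.Dict.empty
      = ((PySem.List.enumerate lst 0).map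
          (fun p => (PySem.List.pyGetD p.2 1 0, p.1))).foldl
          (fun d q => d.modify q.1 [] (· ++ [q.2])) PySem.Dict.empty := by
    rw [List.foldl_map]
    rfl
  rw [hshape, PySem.Dict.getD_foldl_modify_append, PySem.Dict.getD_empty]
  simp only [List.nil_append, List.mem_map, List.mem_filter, beq_iff_eq]
  constructor
  · rintro ⟨q, ⟨⟨p, hp, rfl⟩, hv⟩, rfl⟩
    have := (enum_facts lst p hp).1
    have hv' : PySem.List.pyGetD p.2 1 0 = v := hv
    exact hv' ▸ this
  · intro hocc
    obtain ⟨h0, h1, h2⟩ := hocc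
    have hk : j.toNat < lst.length := by omega
    have hmem : ((j.toNat : Int), lst[j.toNat]) ∈ PySem.List.enumerate lst 0 := by
      rw [PySem.List.mem_enumerate_iff]
      exact ⟨j.toNat, hk, by simp⟩
    refine ⟨(PySem.List.pyGetD lst[j.toNat] 1 0, (j.toNat : Int)), ⟨⟨_, hmem, rfl⟩, ?_⟩, by omega⟩
    have := (enum_facts lst ((j.toNat : Int), lst[j.toNat]) hmem).2.2
    simp only at this
    rw [← this]
    show pvVal lst ((j.toNat : Int)) = v
    rw [show ((j.toNat : Int)) = j by omega]
    exact h2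

-- B's any-test over positions[v] decides the existence of a partner ≥ k
theorem cond_iff (lst : List (List Int)) (v k i : Int) (hk : 1 ≤ k) :
    (((PySem.List.enumerate lst 0).foldl posStep PySem.Dict.empty).getD v []).any
        (fun j => decide (k ≤ j) && j != i) = true
      ↔ ∃ j ∈ PySem.List.pyRange k (lst.length : Int) 1, j ≠ i ∧ pvVal lst j = v := by
  rw [List.any_eq_true]
  constructor
  · rintro ⟨j, hj, hcond⟩
    simp only [Bool.and_eq_true, decide_eq_true_iff, bne_iff_ne, ne_eq] at hcond
    obtain ⟨h0, h1, h2⟩ := (mem_pos lst v j).mp hj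
    exact ⟨j, PySem.List.mem_pyRange_one.mpr ⟨hcond.1, h1⟩, hcond.2, h2⟩
  · rintro ⟨j, hj, hji, hjv⟩
    obtain ⟨hjk, hjn⟩ := PySem.List.mem_pyRange_one.mp hj
    refine ⟨j, (mem_pos lst v j).mpr ⟨by omega, hjn, hjv⟩, ?_⟩
    simp only [Bool.and_eq_true, decide_eq_true_iff, bne_iff_ne, ne_eq]
    exact ⟨hjk, hji⟩

-- B's second loop computes the abstract fold
theorem altLoop_eq (lst : List (List Int)) (hi : Int)
    (ps : List (Int × List Int)) (st : List (List Int) × Int)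
    (hk : 1 ≤ st.2)
    (hps : ∀ p ∈ ps, occAt lst p.1 (PySem.List.pyGetD p.2 1 0) ∧
            pvRow lst p.1 = p.2 ∧ pvVal lst p.1 = PySem.List.pyGetD p.2 1 0) :
    ps.foldl (altStep ((PySem.List.enumerate lst 0).foldl posStep PySem.Dict.empty) hi) st
      = ps.foldl (fun s p => stepF lst hi s p.1) st := by
  induction ps generalizing st with
  | nil => rfl
  | cons p rest ih =>
    obtain ⟨hocc, hrow, hval⟩ := hps p (List.mem_cons_self ..)
    have hstep : altStep ((PySem.List.enumerate lst 0).foldl posStep PySem.Dict.empty) hi st p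
        = stepF lst hi st p.1 := by
      simp only [altStep, stepF]
      rw [← hval, ← hrow]
      by_cases hbd : pvVal lst p.1 = 1 ∨ pvVal lst p.1 = hi
      · rw [if_pos hbd, if_pos hbd]
      · rw [if_neg hbd, if_neg hbd]
        have := cond_iff lst (pvVal lst p.1) st.2 p.1 hk
        by_cases hc : ∃ j ∈ PySem.List.pyRange st.2 (lst.length : Int) 1,
            j ≠ p.1 ∧ pvVal lst j = pvVal lst p.1
        · rw [if_pos (this.mpr hc), if_pos hc]
        · rw [if_neg (fun hb => hc (this.mp hb)), if_neg hc]
    rw [List.foldl_cons, List.foldl_cons, hstep]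
    refine ih (stepF lst hi st p.1) ?_ (fun q hq => hps q (List.mem_cons_of_mem _ hq))
    unfold stepF
    split_ifs <;> omega

theorem splicing_alt_eq_fold (lst : List (List Int)) (num : List Int) :
    splicing_alt lst num =
      ((PySem.List.pyRange 0 (lst.length : Int) 1).foldl
        (stepF lst ((num.length : Int) - 2)) ([], 1)).1 := by
  show ((PySem.List.enumerate lst 0).foldl
      (altStep ((PySem.List.enumerate lst 0).foldl posStep PySem.Dict.empty)
        ((num.length : Int) - 2)) ([], 1)).1 = _
  rw [altLoop_eq lst ((num.length : Int) - 2) (PySem.List.enumerate lst 0) ([], 1)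
        (by norm_num) (fun p hp => enum_facts lst p hp)]
  have hr : PySem.List.pyRange 0 (lst.length : Int) 1
      = (PySem.List.enumerate lst 0).map (fun q => q.1) := by
    rw [PySem.List.map_fst_enumerate]
    norm_num
  rw [hr, List.foldl_map]

-- ===== VERDICT (by name: the statement is the Claim_ definition above) =====
theorem splicing_spec : Claim_equal_splicing := by
  intro lst num _ _
  unfold Spec_splicing
  rw [splicing_eq_fold, splicing_alt_eq_fold]
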